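-- pv_equiv track=rewrite | github.com/daaaaaayoon/Algorithm | src/boj/Boj_4659.py | check_same_char
-- ===== SOURCE A (Python) =====
-- def check_same_char(string):
--     for i in range(len(string)-1):
--         if string[i] == string[i+1]:
--             if string[i] == 'e' or string[i] == 'o':
--                 return True
--             else:
--                 return False
--     return True
-- ===== SOURCE B (Python) =====
-- def check_same_char(string):
--     # Stage 1: run-length encode the whole string.
--     runs = []
--     for c in string:
--         if runs and runs[-1][0] == c:
--             runs[-1][1] += 1
--         else:
--             runs.append([c, 1])
--     # Stage 2: the first run of length >= 2 decides; no such run means True.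
--     for c, n in runs:
--         if n >= 2:
--             return c in 'eo'
--     return True
-- ===== Notes on version B (the rewrite author's own statement) =====
-- stated objective: alternative
-- what changed: Replaces A's single early-exit index scan comparing string[i] with string[i+1] by a two-stage algorithm: first build the full run-length encoding of the string, then judge the first run of length >= 2 against the allowed doubled vowels.
import Mathlib
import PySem

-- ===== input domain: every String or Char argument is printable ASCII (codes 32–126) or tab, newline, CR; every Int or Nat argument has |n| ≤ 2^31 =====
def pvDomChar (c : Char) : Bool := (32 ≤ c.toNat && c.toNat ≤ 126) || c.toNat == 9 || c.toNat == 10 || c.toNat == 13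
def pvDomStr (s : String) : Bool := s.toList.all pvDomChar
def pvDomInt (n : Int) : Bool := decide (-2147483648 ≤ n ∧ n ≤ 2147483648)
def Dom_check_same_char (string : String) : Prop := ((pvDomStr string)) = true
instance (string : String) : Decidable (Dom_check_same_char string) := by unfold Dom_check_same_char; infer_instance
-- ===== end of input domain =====

-- B replaces A's early-exit adjacent-pair scan by two stages: full run-length encoding, then judge the first run of length ≥ 2. Alternative, same cost.

-- ===== PORT A =====
-- the for-loop over range(len(string)-1) with early returns, as recursion over the range list
def aGo (s : String) : List Int → Bool
  | [] => true
  | i :: rest =>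
    match PySem.Str.pyGet? s i, PySem.Str.pyGet? s (i + 1) with
    | some a, some b =>
      if a == b then
        if a == 'e' || a == 'o' then true else false
      else aGo s rest
    | _, _ => aGo s rest   -- unreachable: i and i+1 from range(len-1) are in range

def check_same_char (string : String) : Bool :=
  aGo string (PySem.List.pyRange 0 (PySem.Str.len string - 1) 1)

-- ===== PORT B =====
-- stage 1 of Source B: the RLE loop; the accumulator holds the runs newest-first (runs[-1] = head), reversed at the end
def bStep (acc : List (Char × Nat)) (c : Char) : List (Char × Nat) :=
  match acc with
  | (c0, n) :: rest => if c0 == c then (c0, n + 1) :: rest else (c, 1) :: (c0, n) :: rest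
  | [] => [(c, 1)]

def bRuns (cs : List Char) : List (Char × Nat) :=
  (cs.foldl bStep []).reverse

-- stage 2 of Source B: the for-loop over runs with early return
def bJudge : List (Char × Nat) → Bool
  | [] => true
  | (c, n) :: rest => if 2 ≤ n then (c == 'e' || c == 'o') else bJudge rest

def check_same_char_alt (string : String) : Bool :=
  bJudge (bRuns string.toList)

-- ===== PRECONDITION & SPEC =====
def Spec_check_same_char (string : String) (out : Bool) : Prop := out = check_same_char_alt string
instance (string : String) (out : Bool) : Decidable (Spec_check_same_char string out) := by unfold Spec_check_same_char; infer_instance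

-- ===== CLAIM (what is proved, stated in full; the proofs are below) =====
def Claim_equal_check_same_char : Prop := ∀ (string : String), Dom_check_same_char string → Spec_check_same_char string (check_same_char string)

-- ===== LEMMAS AND PROOFS =====

-- common recursive specification: the first adjacent equal pair decides e/o
def pairCheck : List Char → Bool
  | a :: b :: rest => if a == b then (a == 'e' || a == 'o') else pairCheck (b :: rest)
  | _ => true

theorem aGo_eq_pairCheck (cs : List Char) (k : Nat) :
    aGo (String.ofList cs) (PySem.List.pyRange k ((cs.length : Int) - 1) 1) = pairCheck (cs.drop k) := by
  by_cases h : (k : Int) < (cs.length : Int) - 1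
  · have hk1 : k + 1 < cs.length := by omega
    have hk : k < cs.length := by omega
    rw [PySem.List.pyRange_one_cons h]
    have hcast : ((k : Int) + 1) = ((k + 1 : Nat) : Int) := by push_cast; ring
    have hdrop : cs.drop k = cs[k] :: cs.drop (k + 1) := List.drop_eq_getElem_cons hk
    have hdrop2 : cs.drop (k + 1) = cs[k + 1] :: cs.drop (k + 2) := List.drop_eq_getElem_cons hk1
    have ih := aGo_eq_pairCheck cs (k + 1)
    rw [aGo, hcast, PySem.Str.pyGet?_natCast, PySem.Str.pyGet?_natCast,
      String.toList_ofList, List.getElem?_eq_getElem hk, List.getElem?_eq_getElem hk1]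
    simp only [hdrop, hdrop2, pairCheck]
    by_cases he : cs[k] = cs[k + 1]
    · simp only [he, beq_self_eq_true, if_true]
      cases (cs[k + 1] == 'e' || cs[k + 1] == 'o') <;> rfl
    · simp only [beq_iff_eq, he, if_false, hdrop2] at ih ⊢
      exact ih
  · rw [PySem.List.pyRange_one_eq_nil (by omega)]
    have : (cs.drop k).length ≤ 1 := by simp; omega
    match h2 : cs.drop k with
    | [] => rfl
    | [x] => rfl
    | x :: y :: r => rw [h2] at this; simp at this
termination_by cs.length - k
decreasing_by omega

-- the run-length encoding of c0^n ++ cs (with cs not starting a merge decision made yet), in order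
def rleFrom (c0 : Char) (n : Nat) : List Char → List (Char × Nat)
  | [] => [(c0, n)]
  | c :: cs => if c0 == c then rleFrom c0 (n + 1) cs else (c0, n) :: rleFrom c 1 cs

theorem foldl_bStep_eq_rleFrom (cs : List Char) (c0 : Char) (n : Nat) (rest : List (Char × Nat)) :
    (cs.foldl bStep ((c0, n) :: rest)).reverse = rest.reverse ++ rleFrom c0 n cs := by
  induction cs generalizing c0 n rest with
  | nil => simp [rleFrom]
  | cons c cs ih =>
    simp only [List.foldl_cons, bStep, rleFrom]
    by_cases h : c0 == c
    · simp only [h, if_true]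
      exact ih c0 (n + 1) rest
    · simp only [h, Bool.false_eq_true, if_false]
      rw [ih c 1 ((c0, n) :: rest)]
      simp

theorem bJudge_rleFrom_big (cs : List Char) (c0 : Char) (n : Nat) (hn : 2 ≤ n) :
    bJudge (rleFrom c0 n cs) = (c0 == 'e' || c0 == 'o') := by
  induction cs generalizing n with
  | nil => simp [rleFrom, bJudge, hn]
  | cons c cs ih =>
    simp only [rleFrom]
    by_cases h : c0 == c
    · simp only [h, if_true]; exact ih (n + 1) (by omega)
    · simp [h, bJudge, hn]

theorem bJudge_rleFrom_one (cs : List Char) (c0 : Char) :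
    bJudge (rleFrom c0 1 cs) = pairCheck (c0 :: cs) := by
  induction cs generalizing c0 with
  | nil => simp [rleFrom, bJudge, pairCheck]
  | cons c cs ih =>
    simp only [rleFrom, pairCheck]
    by_cases h : c0 == c
    · have hc : c0 = c := by simpa using h
      simp only [h, if_true, hc, beq_self_eq_true]
      rw [bJudge_rleFrom_big cs c 2 (by omega)]
    · have hc : ¬ c0 = c := by simpa using h
      simp only [h, Bool.false_eq_true, if_false, beq_iff_eq, hc, bJudge]
      simpa using ih c

theorem alt_eq_pairCheck (cs : List Char) :
    bJudge (bRuns cs) = pairCheck cs := by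
  cases cs with
  | nil => rfl
  | cons c cs =>
    unfold bRuns
    simp only [List.foldl_cons, bStep]
    rw [foldl_bStep_eq_rleFrom cs c 1 []]
    simpa using bJudge_rleFrom_one cs c

-- ===== VERDICT (by name: the statement is the Claim_ definition above) =====
theorem check_same_char_spec : Claim_equal_check_same_char := by
  intro s _
  unfold Spec_check_same_char check_same_char check_same_char_alt
  obtain ⟨cs, rfl⟩ : ∃ cs, s = String.ofList cs := ⟨s.toList, String.ofList_toList.symm⟩
  rw [String.toList_ofList, alt_eq_pairCheck]
  have h := aGo_eq_pairCheck cs 0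
  simpa [PySem.Str.len] using h
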